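-- pv_equiv track=rewrite | github.com/hyenni2-2/pythonstudy | Algorithm3.py | match_two
-- ===== SOURCE A (Python) =====
-- def match_two(a):
--     n = len(a)
--     result = set()
--     for i in range(0,n-1):
--         for j in range(i+1,n):
--             if a[i]!=a[j]:
--                 result.update(a[i],a[j])
--     return result
-- ===== SOURCE B (Python) =====
-- def match_two(a):
--     # If at least two distinct values exist, every element has a differing
--     # partner, so the answer is the union of all characters; otherwise empty.
--     if len(set(a)) > 1:
--         return {ch for s in a for ch in s}
--     return set()
-- ===== Notes on version B (the rewrite author's own statement) =====
-- stated objective: faster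
-- what changed: Replaced the O(n^2) all-pairs loop (union chars of each differing pair) by the observation that when at least two distinct values exist every element has a differing partner, so the result is the union of all characters in one pass, and empty otherwise.
import Mathlib
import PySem

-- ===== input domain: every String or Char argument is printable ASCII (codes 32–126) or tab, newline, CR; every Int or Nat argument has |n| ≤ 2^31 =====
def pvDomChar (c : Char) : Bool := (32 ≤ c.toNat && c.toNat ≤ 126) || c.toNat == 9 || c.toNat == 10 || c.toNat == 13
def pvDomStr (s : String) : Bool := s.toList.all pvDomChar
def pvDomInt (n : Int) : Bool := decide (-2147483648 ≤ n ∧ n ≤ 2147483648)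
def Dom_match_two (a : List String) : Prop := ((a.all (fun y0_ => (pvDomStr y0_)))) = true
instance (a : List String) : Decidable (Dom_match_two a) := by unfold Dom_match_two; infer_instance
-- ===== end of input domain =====

-- B replaces A's O(n^2) all-pairs char-union loop by a single pass: with ≥ 2 distinct
-- values every element has a differing partner, so the result is the union of all
-- characters of all elements; otherwise it is empty.

-- shared helper: iterating a Python string yields its characters as 1-char strings
def pyChars (s : String) : List String := s.toList.map (fun c => String.ofList [c])

-- ===== PORT A =====
def match_two (a : List String) : List String :=
  let n : Int := a.length
  (PySem.List.pyRange 0 (n - 1) 1).foldl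
    (fun result i =>
      (PySem.List.pyRange (i + 1) n 1).foldl
        (fun result j =>
          if PySem.List.pyGetD a i "" ≠ PySem.List.pyGetD a j "" then
            PySem.Set.update (PySem.Set.update result (pyChars (PySem.List.pyGetD a i "")))
              (pyChars (PySem.List.pyGetD a j ""))
          else result)
        result)
    PySem.Set.empty

-- ===== PORT B =====
def match_two_alt (a : List String) : List String :=
  if 1 < PySem.Set.len (PySem.Set.ofList a) then
    a.foldl (fun result s => PySem.Set.update result (pyChars s)) PySem.Set.empty
  else
    PySem.Set.empty

-- ===== PRECONDITION & SPEC =====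
def Spec_match_two (a : List String) (out : List String) : Prop := out = match_two_alt a
instance (a : List String) (out : List String) : Decidable (Spec_match_two a out) := by unfold Spec_match_two; infer_instance

-- ===== CLAIM (what is proved, stated in full; the proofs are below) =====
def Claim_equal_match_two : Prop := ∀ (a : List String), Dom_match_two a → Spec_match_two a (match_two a)

-- ===== LEMMAS AND PROOFS =====

-- A's loop, restated structurally: the i-th outer iteration pairs a[i] with the tail a[i+1:]
def addC (r : PySem.Set String) (s : String) : PySem.Set String :=
  PySem.Set.update r (pyChars s)

def pass1 (x : String) (t : List String) (r : PySem.Set String) : PySem.Set String :=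
  t.foldl (fun r y => if x ≠ y then addC (addC r x) y else r) r

def loopA : List String → PySem.Set String → PySem.Set String
  | [], r => r
  | x :: t, r => loopA t (pass1 x t r)

-- B's loop: union of the chars of every element
def accB (r : PySem.Set String) (l : List String) : PySem.Set String :=
  l.foldl addC r

-- inner loop of A at index i, as a fold over the tail a[i+1:]
lemma inner_loop (a : List String) (i : Nat) (r : PySem.Set String) :
    (PySem.List.pyRange ((i : Int) + 1) (a.length : Int) 1).foldl
      (fun result j =>
        if PySem.List.pyGetD a (i : Int) "" ≠ PySem.List.pyGetD a j "" then
          PySem.Set.update (PySem.Set.update result (pyChars (PySem.List.pyGetD a (i : Int) "")))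
            (pyChars (PySem.List.pyGetD a j ""))
        else result) r
    = pass1 (PySem.List.pyGetD a (i : Int) "") (a.drop (i + 1)) r := by
  rw [PySem.List.foldl_pyRange_pyGetD' a ""
    (fun result y =>
      if PySem.List.pyGetD a (i : Int) "" ≠ y then
        PySem.Set.update (PySem.Set.update result (pyChars (PySem.List.pyGetD a (i : Int) "")))
          (pyChars y)
      else result) r (a := (i : Int) + 1) (by positivity)]
  have : ((i : Int) + 1).toNat = i + 1 := by omega
  rw [this]
  rfl

-- A's index loops equal the structural recursion loopA
lemma outer_eq (a : List String) (r : PySem.Set String) :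
    (PySem.List.pyRange 0 ((a.length : Int) - 1) 1).foldl
      (fun result i =>
        (PySem.List.pyRange (i + 1) (a.length : Int) 1).foldl
          (fun result j =>
            if PySem.List.pyGetD a i "" ≠ PySem.List.pyGetD a j "" then
              PySem.Set.update (PySem.Set.update result (pyChars (PySem.List.pyGetD a i "")))
                (pyChars (PySem.List.pyGetD a j ""))
            else result) result) r
    = loopA a r := by
  induction a generalizing r with
  | nil =>
      rw [PySem.List.pyRange_one_eq_nil (by norm_num)]
      rfl
  | cons x t ih =>
      rcases eq_or_ne t [] with ht | ht
      · subst ht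
        rw [show ((([x] : List String).length : Int) - 1) = 0 by norm_num,
            PySem.List.pyRange_one_eq_nil (le_refl 0)]
        rfl
      · have hpos : 0 < (t.length : Int) := by
          have := List.length_pos_iff.mpr ht; exact_mod_cast this
        have hlen : (((x :: t).length : Int) - 1) = (t.length : Int) := by
          push_cast [List.length_cons]; ring
        rw [hlen, PySem.List.pyRange_one_cons hpos, List.foldl_cons]
        -- first iteration (i = 0) is pass1 x t r
        have h0 : (PySem.List.pyRange (0 + 1) ((x :: t).length : Int) 1).foldl
            (fun result j =>
              if PySem.List.pyGetD (x :: t) 0 "" ≠ PySem.List.pyGetD (x :: t) j "" then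
                PySem.Set.update (PySem.Set.update result (pyChars (PySem.List.pyGetD (x :: t) 0 "")))
                  (pyChars (PySem.List.pyGetD (x :: t) j ""))
              else result) r = pass1 x t r := by
          have := inner_loop (x :: t) 0 r
          simpa using this
        rw [h0]
        -- remaining iterations: shift indices by one and use the IH on t
        rw [show loopA (x :: t) r = loopA t (pass1 x t r) from rfl, ← ih (pass1 x t r)]
        rw [show ((0 : Int) + 1) = 1 by ring]
        rw [PySem.List.pyRange_one 1 (t.length : Int),
            PySem.List.pyRange_one 0 ((t.length : Int) - 1)]
        rw [show ((t.length : Int) - 1 - 0) = ((t.length : Int) - 1) by ring]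
        rw [List.foldl_map, List.foldl_map]
        apply PySem.List.foldl_congr_mem
        intro acc k hk
        have hcast : (1 : Int) + (k : Int) = ((k + 1 : Nat) : Int) := by push_cast; ring
        rw [hcast]
        have hL := inner_loop (x :: t) (k + 1) acc
        have hR := inner_loop t k acc
        rw [show ((0 : Int) + (k : Int)) = ((k : Nat) : Int) by ring] at *
        rw [hL, hR]
        have : PySem.List.pyGetD (x :: t) ((k + 1 : Nat) : Int) "" = PySem.List.pyGetD t ((k : Nat) : Int) "" := by
          rw [PySem.List.pyGetD_natCast, PySem.List.pyGetD_natCast]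
          simp [List.getD]
        rw [this]
        rfl

lemma foldl_add_of_subset (l : List String) (s : PySem.Set String)
    (h : ∀ z ∈ l, z ∈ s) : l.foldl PySem.Set.add s = s := by
  induction l with
  | nil => rfl
  | cons z l ih =>
      rw [List.foldl_cons, PySem.Set.add_of_mem (h z (by simp))]
      exact ih fun w hw => h w (by simp [hw])

lemma update_eq_foldl (s : PySem.Set String) (l : List String) :
    PySem.Set.update s l = l.foldl PySem.Set.add s := rfl

lemma addC_of_subset {x : String} {r : PySem.Set String}
    (h : ∀ z ∈ pyChars x, z ∈ r) : addC r x = r := by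
  rw [addC, update_eq_foldl]; exact foldl_add_of_subset _ _ h

lemma mem_addC_left {z : String} {r : PySem.Set String} (x : String)
    (h : z ∈ r) : z ∈ addC r x := by
  rw [addC]; exact (PySem.Set.mem_update r (pyChars x) z).mpr (Or.inl h)

lemma mem_addC_chars {z x : String} (r : PySem.Set String)
    (h : z ∈ pyChars x) : z ∈ addC r x := by
  rw [addC]; exact (PySem.Set.mem_update r (pyChars x) z).mpr (Or.inr h)

-- "all characters of x are already in s"
def Sat (x : String) (s : PySem.Set String) : Prop := ∀ z ∈ pyChars x, z ∈ s

lemma sat_addC_self (x : String) (r : PySem.Set String) : Sat x (addC r x) :=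
  fun _ hz => mem_addC_chars r hz

lemma sat_addC (y : String) {x : String} {r : PySem.Set String} (h : Sat x r) :
    Sat x (addC r y) := fun z hz => mem_addC_left y (h z hz)

lemma mem_accB_left {z : String} {r : PySem.Set String} (l : List String)
    (h : z ∈ r) : z ∈ accB r l := by
  induction l generalizing r with
  | nil => exact h
  | cons y l ih => exact ih (mem_addC_left y h)

lemma sat_accB (y : String) {l : List String} (r : PySem.Set String) (h : y ∈ l) :
    Sat y (accB r l) := by
  induction l generalizing r with
  | nil => cases h
  | cons w l ih =>
      rcases List.mem_cons.mp h with h | h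
      · subst h
        exact fun z hz => mem_accB_left l (mem_addC_chars r hz)
      · exact ih (addC r w) h

lemma sat_accB_left {x : String} {r : PySem.Set String} (l : List String)
    (h : Sat x r) : Sat x (accB r l) := fun z hz => mem_accB_left l (h z hz)

lemma accB_noop {l : List String} {s : PySem.Set String}
    (h : ∀ y ∈ l, Sat y s) : accB s l = s := by
  induction l with
  | nil => rfl
  | cons y l ih =>
      rw [accB, List.foldl_cons, addC_of_subset (h y (by simp))]
      exact ih fun w hw => h w (by simp [hw])

lemma accB_filter {x : String} (l : List String) {s : PySem.Set String}
    (h : Sat x s) : accB s (l.filter (fun y => y ≠ x)) = accB s l := by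
  induction l generalizing s with
  | nil => rfl
  | cons y l ih =>
      by_cases hy : y = x
      · subst hy
        rw [show (y :: l).filter (fun z => z ≠ y) = l.filter (fun z => z ≠ y) by simp,
            show accB s (y :: l) = accB (addC s y) l from rfl,
            addC_of_subset h]
        exact ih h
      · rw [show (y :: l).filter (fun z => z ≠ x) = y :: l.filter (fun z => z ≠ x) by simp [hy],
            show accB s (y :: l.filter (fun z => z ≠ x)) = accB (addC s y) (l.filter (fun z => z ≠ x)) from rfl,
            show accB s (y :: l) = accB (addC s y) l from rfl]
        exact ih (sat_addC y h)

lemma pass1_cons (x y : String) (t : List String) (r : PySem.Set String) :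
    pass1 x (y :: t) r = pass1 x t (if x ≠ y then addC (addC r x) y else r) := rfl

lemma pass1_all_eq {x : String} {t : List String} (r : PySem.Set String)
    (h : ∀ y ∈ t, y = x) : pass1 x t r = r := by
  induction t generalizing r with
  | nil => rfl
  | cons y u ih =>
      rw [pass1_cons, if_neg (by simp [h y (by simp)]),
          ih _ fun w hw => h w (by simp [hw])]

lemma pass1_sat {x : String} (t : List String) {r : PySem.Set String}
    (h : Sat x r) : pass1 x t r = accB r (t.filter (fun y => y ≠ x)) := by
  induction t generalizing r with
  | nil => rfl
  | cons y u ih =>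
      by_cases hy : y = x
      · subst hy
        rw [pass1_cons, if_neg (by simp),
            show (y :: u).filter (fun z => z ≠ y) = u.filter (fun z => z ≠ y) by simp]
        exact ih h
      · rw [pass1_cons, if_pos (by simp [Ne.symm hy]), addC_of_subset h,
            show (y :: u).filter (fun z => z ≠ x) = y :: u.filter (fun z => z ≠ x) by simp [hy],
            show accB r (y :: u.filter (fun z => z ≠ x)) = accB (addC r y) (u.filter (fun z => z ≠ x)) from rfl]
        exact ih (sat_addC y h)

lemma pass1_diverse {x : String} {t : List String} (r : PySem.Set String)
    (hd : ∃ y ∈ t, y ≠ x) : pass1 x t r = accB (addC r x) (t.filter (fun y => y ≠ x)) := by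
  induction t generalizing r with
  | nil => simp at hd
  | cons y u ih =>
      by_cases hy : y = x
      · subst hy
        have hd' : ∃ w ∈ u, w ≠ y := by
          rcases hd with ⟨w, hw, hne⟩
          rcases List.mem_cons.mp hw with h | h
          · exact absurd h hne
          · exact ⟨w, h, hne⟩
        rw [pass1_cons, if_neg (by simp),
            show (y :: u).filter (fun z => z ≠ y) = u.filter (fun z => z ≠ y) by simp]
        exact ih r hd'
      · rw [pass1_cons, if_pos (by simp [Ne.symm hy]),
            pass1_sat u (sat_addC y (sat_addC_self x r)),
            show (y :: u).filter (fun z => z ≠ x) = y :: u.filter (fun z => z ≠ x) by simp [hy]]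
        rfl

lemma loopA_all_eq {a : List String} (r : PySem.Set String)
    (h : ∀ y ∈ a, ∀ z ∈ a, y = z) : loopA a r = r := by
  induction a generalizing r with
  | nil => rfl
  | cons x t ih =>
      rw [show loopA (x :: t) r = loopA t (pass1 x t r) from rfl,
          pass1_all_eq r fun y hy => h y (by simp [hy]) x (by simp)]
      exact ih r fun y hy z hz => h y (by simp [hy]) z (by simp [hz])

lemma loopA_sat {t : List String} (S : PySem.Set String)
    (h : ∀ y ∈ t, Sat y S) : loopA t S = S := by
  induction t with
  | nil => rfl
  | cons y u ih =>
      have h1 : pass1 y u S = S := by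
        rw [pass1_sat u (h y (by simp))]
        exact accB_noop fun w hw => h w (by simp [List.mem_of_mem_filter hw])
      rw [show loopA (y :: u) S = loopA u (pass1 y u S) from rfl, h1]
      exact ih fun w hw => h w (by simp [hw])

lemma loopA_diverse {x : String} {t : List String}
    (hd : ∃ y ∈ t, y ≠ x) : loopA (x :: t) PySem.Set.empty = accB PySem.Set.empty (x :: t) := by
  rw [show loopA (x :: t) PySem.Set.empty = loopA t (pass1 x t PySem.Set.empty) from rfl,
      pass1_diverse PySem.Set.empty hd]
  set T := accB (addC PySem.Set.empty x) (t.filter (fun y => y ≠ x)) with hT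
  have hsat : ∀ y ∈ t, Sat y T := by
    intro y hy
    by_cases hyx : y = x
    · subst hyx
      exact sat_accB_left _ (fun z hz => mem_addC_chars _ hz)
    · exact sat_accB y _ (by simp [List.mem_filter, hy, hyx])
  rw [loopA_sat T hsat, hT, accB_filter _ (sat_addC_self x _)]
  rfl

lemma one_lt_length_of_two_mem {l : List String} {x y : String}
    (hx : x ∈ l) (hy : y ∈ l) (h : x ≠ y) : 1 < l.length := by
  match l with
  | [] => cases hx
  | [z] =>
      simp only [List.mem_singleton] at hx hy
      exact absurd (hx.trans hy.symm) h
  | _ :: _ :: _ => simp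

lemma ofList_all_eq {x : String} {t : List String} (h : ∀ y ∈ t, y = x) :
    PySem.Set.ofList (x :: t) = [x] := by
  rw [PySem.Set.ofList_eq_foldl, List.foldl_cons,
      show PySem.Set.add [] x = [x] from rfl]
  exact foldl_add_of_subset t [x] fun z hz => by simp [h z hz]

lemma match_two_eq_alt (a : List String) : match_two a = match_two_alt a := by
  have hA : match_two a = loopA a PySem.Set.empty :=
    show _ = _ from outer_eq a PySem.Set.empty
  rcases a with _ | ⟨x, t⟩
  · rfl
  · by_cases hdiv : ∃ y ∈ t, y ≠ x
    · have hlen : 1 < PySem.Set.len (PySem.Set.ofList (x :: t)) := by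
        rcases hdiv with ⟨y, hy, hne⟩
        rw [PySem.Set.len_eq]
        exact_mod_cast one_lt_length_of_two_mem
          ((PySem.Set.mem_ofList _ x).mpr (by simp))
          ((PySem.Set.mem_ofList _ y).mpr (by simp [hy])) (Ne.symm hne)
      rw [hA, loopA_diverse hdiv, match_two_alt, if_pos hlen]
      rfl
    · push_neg at hdiv
      have hall : ∀ y ∈ x :: t, ∀ z ∈ x :: t, y = z := by
        intro y hy z hz
        have hy' : y = x := (List.mem_cons.mp hy).elim id (hdiv y)
        have hz' : z = x := (List.mem_cons.mp hz).elim id (hdiv z)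
        rw [hy', hz']
      have hlen : ¬ 1 < PySem.Set.len (PySem.Set.ofList (x :: t)) := by
        rw [ofList_all_eq hdiv, PySem.Set.len_eq]
        norm_num
      rw [hA, loopA_all_eq PySem.Set.empty hall, match_two_alt, if_neg hlen]

-- ===== VERDICT (by name: the statement is the Claim_ definition above) =====
theorem match_two_spec : Claim_equal_match_two := by
  intro a _
  show match_two a = match_two_alt a
  exact match_two_eq_alt a
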